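-- pv_equiv track=rewrite | github.com/ProLint/prolint2 | prolint2/server/chord_utils.py | get_ordered_combinations
-- ===== SOURCE A (Python) =====
-- from itertools import combinations
--
-- def sort_dict(d, cutoff=None):
--     """
--     Takes a dictionary as input, and sorts it according to values.
--     The purpose of this function is to order residue:contacts dicts build
--     by `per_lipid_contacts` function according to the number of contacts.
--
--     The `cutoff` value returns only a subsection of this dict. The cutoff
--     is used by `get_linked_nodes` to get a subsection of edges/links. This is
--     important because visually we can not easily distinguish between link widths,
--     so filtering here allows us to only show the top X links.
--     """
--     item_list = sorted(d.items(), key=lambda x: x[1], reverse=True)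
--     if cutoff:
--         return dict(item_list[:cutoff])
--     return dict(item_list)
--
-- def get_ordered_combinations(lipid_contacts):
--     """
--     This function turns residue:contact information into shared contacts. To speed up
--     performance, shared contacts are define in an adhoc manner. It takes as input the
--     returned dict by `per_lipid_contacts`. It then forms all possible size-2 combinations.
--
--     For a lipid ID, all these residue-residue combinations are seen as shared contacts.
--     That is, if a lipid interacts with residues 1, 2, and 3, then all possible size-2
--     combination (1-2, 1-3, 2-3) are seen as shared contacts.
--
--     These combinations are assigned as keys, with values corresponding to the sum
--     of all matching shared contacts across all lipid IDs. This dict is then returned.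
--     This approach seems to work quite well in addition to being intuitive. One potential
--     disadvantage, however, is that if a residue has very high contact count, then so will
--     all combinations involving that residue.
--
--     Another important point to consider is that since shared contacts are defined adhoc,
--     an edge linking two nodes, cannot reliably be interpreted as geometric distance.
--     Meaning, it does not mean that those two nodes/residues are connected by interactions
--     with the same lipid.
--
--     TODO:
--     1.
--     Is it possible to improve the last point, by counting only real shared contacts?
--     The information is already contained in `contacts.contact_frames`.
--     2.
--     combinations call already returns an iterable. Simply by removing the
--     subsequent call to list().
--     """
--     ordered_combinations = {}
--     for lipid_id, lipid_vals in lipid_contacts.items():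
--         sorted_lipid_vals = sort_dict(lipid_vals)
--
--         lipid_residues = list(sorted_lipid_vals.keys())
--         for res1, res2 in list(combinations(lipid_residues, 2)):
--             value = sum([sorted_lipid_vals[res1], sorted_lipid_vals[res2]])
--             key = f"{res1},{res2}"
--
--             if key in ordered_combinations:
--                 ordered_combinations[key] = ordered_combinations[key] + value
--             else:
--                 ordered_combinations[key] = value
--
--     return ordered_combinations
-- ===== SOURCE B (Python) =====
-- def get_ordered_combinations(lipid_contacts):
--     def pair_sums(items):
--         if not items:
--             return []
--         (res1, val1), rest = items[0], items[1:]
--         head = [(f"{res1},{res2}", val1 + val2) for res2, val2 in rest]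
--         return head + pair_sums(rest)
--
--     contributions = []
--     for lipid_vals in lipid_contacts.values():
--         contributions += pair_sums(
--             sorted(lipid_vals.items(), key=lambda kv: kv[1], reverse=True))
--
--     totals = {}
--     for key, value in contributions:
--         totals[key] = totals.get(key, 0) + value
--     return totals
-- ===== Notes on version B (the rewrite author's own statement) =====
-- stated objective: alternative
-- what changed: Replaces A's in-loop dict mutation with a staged pipeline: a recursive pair_sums turns each lipid's sorted items into a flat list of keyed contributions, all lipids' contributions are concatenated, and one separate aggregation pass folds them into the result dict (no sort_dict helper, no rebuilt per-lipid dict, no per-pair membership test or value lookups).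
import Mathlib
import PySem

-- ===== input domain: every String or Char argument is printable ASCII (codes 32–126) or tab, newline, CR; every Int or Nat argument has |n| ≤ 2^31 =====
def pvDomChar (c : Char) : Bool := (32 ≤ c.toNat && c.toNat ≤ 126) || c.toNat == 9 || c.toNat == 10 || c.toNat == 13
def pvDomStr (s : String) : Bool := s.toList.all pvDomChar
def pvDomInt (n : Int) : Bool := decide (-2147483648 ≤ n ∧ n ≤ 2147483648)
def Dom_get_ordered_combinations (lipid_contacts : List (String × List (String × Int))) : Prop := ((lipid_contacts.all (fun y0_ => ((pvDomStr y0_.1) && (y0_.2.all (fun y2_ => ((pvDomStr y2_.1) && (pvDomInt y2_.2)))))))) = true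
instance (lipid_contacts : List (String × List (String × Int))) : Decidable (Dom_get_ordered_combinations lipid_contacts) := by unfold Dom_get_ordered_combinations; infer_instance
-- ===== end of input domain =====

-- B restructures A as a staged pipeline: a recursive pair_sums flattens each lipid's
-- sorted items into keyed contributions, the flat lists are concatenated, and one
-- separate pass aggregates them into the result dict — no sort_dict helper, no rebuilt
-- per-lipid dict, no per-pair membership test or value lookups (objective: alternative).
-- Equivalence is on the RETURN value; neither version mutates its argument.

-- ===== PORT A =====
def sort_dict (d : List (String × Int)) (cutoff : Option Int) : PySem.Dict String Int :=
  let item_list := PySem.List.sorted d (fun x => x.2) true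
  match cutoff with
  | some c => if c ≠ 0 then PySem.Dict.ofList (PySem.List.slice item_list none (some c))
              else PySem.Dict.ofList item_list
  | none => PySem.Dict.ofList item_list

def get_ordered_combinations (lipid_contacts : List (String × List (String × Int))) : List (String × Int) :=
  (lipid_contacts.foldl
    (fun ordered_combinations lip =>
      let sorted_lipid_vals := sort_dict lip.2 none
      let lipid_residues := PySem.Dict.keys sorted_lipid_vals
      (PySem.List.combinations lipid_residues 2).foldl
        (fun ordered_combinations combo =>
          match combo with
          | [res1, res2] =>
            -- d[res1]/d[res2]: the keys come from the dict itself, so always present; getD is exact here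
            let value := ([sorted_lipid_vals.getD res1 0, sorted_lipid_vals.getD res2 0] : List Int).sum
            let key := res1 ++ "," ++ res2
            if ordered_combinations.contains key then
              ordered_combinations.insert key (ordered_combinations.getD key 0 + value)
            else
              ordered_combinations.insert key value
          | _ => ordered_combinations)
        ordered_combinations)
    PySem.Dict.empty).items

-- ===== PORT B =====
-- Source B's recursive pair_sums helper
def pair_sums : List (String × Int) → List (String × Int)
  | [] => []
  | (res1, val1) :: rest =>
      (rest.map (fun q => (res1 ++ "," ++ q.1, val1 + q.2))) ++ pair_sums rest

def get_ordered_combinations_alt (lipid_contacts : List (String × List (String × Int))) : List (String × Int) :=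
  let contributions :=
    lipid_contacts.foldl
      (fun contributions lip =>
        contributions ++ pair_sums (PySem.List.sorted lip.2 (fun kv => kv.2) true))
      []
  (contributions.foldl
    (fun totals kv => totals.insert kv.1 (totals.getD kv.1 0 + kv.2))
    PySem.Dict.empty).items

-- ===== PRECONDITION & SPEC =====
-- Pre_ excludes association lists whose inner lists repeat a residue key: those do not
-- represent Python dicts (A's argument is a dict of dicts, whose keys are unique).
def Pre_get_ordered_combinations (lipid_contacts : List (String × List (String × Int))) : Prop :=
  ∀ p ∈ lipid_contacts, (p.2.map Prod.fst).Nodup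
instance (lipid_contacts : List (String × List (String × Int))) : Decidable (Pre_get_ordered_combinations lipid_contacts) := by unfold Pre_get_ordered_combinations; infer_instance

def pvWitness_get_ordered_combinations : (List (String × List (String × Int))) :=
  [("L1", [("r1", 1), ("r2", 3), ("r3", 2)]), ("L2", [("r2", 1), ("r3", 1)])]

def Spec_get_ordered_combinations (lipid_contacts : List (String × List (String × Int))) (out : List (String × Int)) : Prop := out = get_ordered_combinations_alt lipid_contacts
instance (lipid_contacts : List (String × List (String × Int))) (out : List (String × Int)) : Decidable (Spec_get_ordered_combinations lipid_contacts out) := by unfold Spec_get_ordered_combinations; infer_instance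

-- ===== CLAIM (what is proved, stated in full; the proofs are below) =====
def Claim_equal_get_ordered_combinations : Prop := ∀ (lipid_contacts : List (String × List (String × Int))), Dom_get_ordered_combinations lipid_contacts → Pre_get_ordered_combinations lipid_contacts → Spec_get_ordered_combinations lipid_contacts (get_ordered_combinations lipid_contacts)

-- ===== LEMMAS AND PROOFS =====

-- the ordered list of index pairs (l[i], l[j]), i < j
def pvPairs {α : Type} : List α → List (α × α)
  | [] => []
  | x :: xs => (xs.map (fun y => (x, y))) ++ pvPairs xs

-- the common per-pair accumulation step both programs perform
def pvStep (t : PySem.Dict String Int) (pq : (String × Int) × (String × Int)) : PySem.Dict String Int :=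
  t.insert (pq.1.1 ++ "," ++ pq.2.1) (t.getD (pq.1.1 ++ "," ++ pq.2.1) 0 + pq.1.2 + pq.2.2)

theorem pvCombinations_two {α : Type} (l : List α) :
    PySem.List.combinations l 2 = (pvPairs l).map (fun pq => [pq.1, pq.2]) := by
  induction l with
  | nil => rfl
  | cons x xs ih =>
    simp [PySem.List.combinations_cons_succ, PySem.List.combinations_one, pvPairs, ih,
      List.map_map, Function.comp]

theorem pvMem_pairs {α : Type} {l : List α} {pq : α × α} (h : pq ∈ pvPairs l) :
    pq.1 ∈ l ∧ pq.2 ∈ l := by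
  induction l with
  | nil => simp [pvPairs] at h
  | cons x xs ih =>
    simp only [pvPairs, List.mem_append, List.mem_map] at h
    rcases h with ⟨y, hy, rfl⟩ | h
    · exact ⟨List.mem_cons_self, List.mem_cons_of_mem _ hy⟩
    · exact ⟨List.mem_cons_of_mem _ (ih h).1, List.mem_cons_of_mem _ (ih h).2⟩

theorem pvOfList_items {s : List (String × Int)} (h : (s.map Prod.fst).Nodup) :
    (PySem.Dict.ofList s).items = s := by
  have e : PySem.Dict.ofList s = s.foldl (fun d a => d.insert a.1 a.2) PySem.Dict.empty := rfl
  rw [e, PySem.Dict.items_foldl_insert_fresh s Prod.fst Prod.snd PySem.Dict.empty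
    (by intro a _; simp [pysem]) h]
  simp [pysem, PySem.Dict.empty]

theorem pvGetD_mem {s : List (String × Int)} (h : (s.map Prod.fst).Nodup)
    {q : String × Int} (hm : q ∈ s) : (PySem.Dict.ofList s).getD q.1 0 = q.2 := by
  refine PySem.Dict.getD_of_get?_eq_some _ _ (PySem.Dict.get?_of_mem_items _ ?_ ?_)
  · rw [pvOfList_items h]; exact hm
  · exact PySem.Dict.nodup_keys_ofList s

-- A's per-lipid body equals the pvPairs fold
theorem pvAside (vals : List (String × Int)) (h : (vals.map Prod.fst).Nodup) (oc : PySem.Dict String Int) :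
    (PySem.List.combinations (PySem.Dict.keys (sort_dict vals none)) 2).foldl
      (fun ordered_combinations combo =>
        match combo with
        | [res1, res2] =>
          let value := ([(sort_dict vals none).getD res1 0, (sort_dict vals none).getD res2 0] : List Int).sum
          let key := res1 ++ "," ++ res2
          if ordered_combinations.contains key then
            ordered_combinations.insert key (ordered_combinations.getD key 0 + value)
          else
            ordered_combinations.insert key value
        | _ => ordered_combinations) oc
    = (pvPairs (PySem.List.sorted vals (fun x => x.2) true)).foldl pvStep oc := by
  have e : sort_dict vals none = PySem.Dict.ofList (PySem.List.sorted vals (fun x => x.2) true) := rfl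
  have hnd : ((PySem.List.sorted vals (fun x => x.2) true).map Prod.fst).Nodup := by
    have hp : ((PySem.List.sorted vals (fun x => x.2) true).map Prod.fst).Perm (vals.map Prod.fst) :=
      (PySem.List.sorted_perm vals _ true).map Prod.fst
    exact hp.nodup_iff.mpr h
  have hkeys : PySem.Dict.keys (sort_dict vals none)
      = (PySem.List.sorted vals (fun x => x.2) true).map Prod.fst := by
    rw [e]; simp only [PySem.Dict.keys]; rw [pvOfList_items hnd]
  rw [hkeys, PySem.List.combinations_map, pvCombinations_two, List.map_map, List.foldl_map]
  apply PySem.List.foldl_congr_mem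
  intro acc pq hpq
  have h1 : (sort_dict vals none).getD pq.1.1 0 = pq.1.2 := by
    rw [e]; exact pvGetD_mem hnd (pvMem_pairs hpq).1
  have h2 : (sort_dict vals none).getD pq.2.1 0 = pq.2.2 := by
    rw [e]; exact pvGetD_mem hnd (pvMem_pairs hpq).2
  show (if acc.contains (pq.1.1 ++ "," ++ pq.2.1) then
          acc.insert (pq.1.1 ++ "," ++ pq.2.1) (acc.getD (pq.1.1 ++ "," ++ pq.2.1) 0 +
            ([(sort_dict vals none).getD pq.1.1 0, (sort_dict vals none).getD pq.2.1 0] : List Int).sum)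
        else
          acc.insert (pq.1.1 ++ "," ++ pq.2.1)
            (([(sort_dict vals none).getD pq.1.1 0, (sort_dict vals none).getD pq.2.1 0] : List Int).sum))
      = pvStep acc pq
  rw [h1, h2]
  cases hc : acc.contains (pq.1.1 ++ "," ++ pq.2.1) with
  | false =>
    simp [pvStep, PySem.Dict.getD_of_not_contains acc 0 hc]
  | true =>
    simp [pvStep, add_assoc]

-- pair_sums is the keyed image of pvPairs
theorem pvPair_sums_eq (l : List (String × Int)) :
    pair_sums l = (pvPairs l).map (fun pq => (pq.1.1 ++ "," ++ pq.2.1, pq.1.2 + pq.2.2)) := by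
  induction l with
  | nil => rfl
  | cons x xs ih =>
    cases x with
    | mk r v => simp [pair_sums, pvPairs, ih, List.map_map, Function.comp]

-- folding the aggregation step over a flatMap is the nested fold
theorem pvFoldl_flatMap {α β γ : Type} (g : γ → β → γ) (f : α → List β) :
    ∀ (l : List α) (d : γ),
      (l.flatMap f).foldl g d = l.foldl (fun d x => (f x).foldl g d) d := by
  intro l
  induction l with
  | nil => intro d; rfl
  | cons x xs ih => intro d; simp [List.flatMap_cons, List.foldl_append, ih]

-- B's per-lipid contribution list aggregates exactly like the pvPairs fold
theorem pvBside (vals : List (String × Int)) (t0 : PySem.Dict String Int) :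
    (pair_sums (PySem.List.sorted vals (fun kv => kv.2) true)).foldl
      (fun totals kv => totals.insert kv.1 (totals.getD kv.1 0 + kv.2)) t0
    = (pvPairs (PySem.List.sorted vals (fun kv => kv.2) true)).foldl pvStep t0 := by
  rw [pvPair_sums_eq, List.foldl_map]
  apply PySem.List.foldl_congr_mem
  intro acc pq _
  simp [pvStep, add_assoc]

-- ===== VERDICT (by name: the statement is the Claim_ definition above) =====
theorem get_ordered_combinations_spec : Claim_equal_get_ordered_combinations := by
  intro lc _ hpre
  unfold Spec_get_ordered_combinations get_ordered_combinations get_ordered_combinations_alt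
  rw [PySem.List.foldl_append_eq_flatMap]
  simp only [List.nil_append]
  rw [pvFoldl_flatMap]
  congr 1
  apply PySem.List.foldl_congr_mem
  intro acc p hp
  exact (pvAside p.2 (hpre p hp) acc).trans (pvBside p.2 acc).symm
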